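-- pv_equiv track=rewrite | github.com/presianbg/HackBG-Programming101 | WEEK-1/1/palindrome_score.py | p_score
-- ===== SOURCE A (Python) =====
-- def p_score(n):
--     s = 0
--     c = 0
--     l = str(n)
--     if l == l[::-1]:
--         return 1
--     s = n + int(l[::-1])
--     l = ( 1 + p_score(s))
--     return l
-- ===== SOURCE B (Python) =====
-- def p_score(n):
--     trail = [n]
--     while True:
--         digits = list(str(trail[-1]))
--         if digits == list(reversed(digits)):
--             return len(trail)
--         trail.append(trail[-1] + int("".join(reversed(digits))))
-- ===== Notes on version B (the rewrite author's own statement) =====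
-- stated objective: alternative
-- what changed: Replaces A's recursion (1 + p_score(reverse-add)) by a loop that builds the whole reverse-add trajectory as a list (char-list palindrome test, reversed/join instead of slicing) and returns its length.
import Mathlib
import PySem

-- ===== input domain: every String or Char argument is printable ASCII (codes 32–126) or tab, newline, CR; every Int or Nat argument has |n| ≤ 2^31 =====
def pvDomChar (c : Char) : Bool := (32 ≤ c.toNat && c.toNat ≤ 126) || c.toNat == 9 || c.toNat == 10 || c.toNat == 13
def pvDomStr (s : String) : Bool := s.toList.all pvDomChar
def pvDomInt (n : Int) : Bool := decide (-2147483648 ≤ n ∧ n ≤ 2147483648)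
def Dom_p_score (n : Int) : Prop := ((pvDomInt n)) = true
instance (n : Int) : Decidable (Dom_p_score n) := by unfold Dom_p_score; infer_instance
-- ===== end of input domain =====

-- B replaces A's recursion (1 + p_score(reverse-add)) by building the whole reverse-add
-- trajectory as a list and returning its length: a different decomposition, same cost.
-- Both programs are partial (Lychrel candidates recurse/loop forever; Python A hits its
-- recursion limit): the ports are fueled with Python's default recursion limit and
-- Pre_ restricts to the inputs on which A actually returns.

-- ===== PORT A =====
-- fueled transliteration of A's recursion; int(l[::-1]) via PySem.Int.ofStr? (its none case,
-- Python's ValueError on negative n, is outside Pre_; .getD 0 is never reached under Pre_)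
def pScoreAux : Nat → Int → Int
  | 0, _ => 0
  | f+1, n =>
    let l := PySem.Int.toStr n
    if l = (PySem.Str.slice? l none none (-1)).getD "" then 1
    else
      let s := n + (PySem.Int.ofStr? ((PySem.Str.slice? l none none (-1)).getD "")).getD 0
      1 + pScoreAux f s

def p_score (n : Int) : Int := pScoreAux 1000 n

-- ===== PORT B =====
-- fueled transliteration of B's trajectory loop: each iteration reads trail[-1]
-- (PySem.List.pyGetD trail (-1)), tests the digit list against its reversal, and either
-- stops or appends the reverse-add successor; p_score_alt returns the final length
def pAltTrail : Nat → List Int → List Int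
  | 0, trail => trail
  | f+1, trail =>
    let digits := PySem.Int.toChars (PySem.List.pyGetD trail (-1) 0)
    if digits = digits.reverse then trail
    else pAltTrail f (trail ++
      [PySem.List.pyGetD trail (-1) 0 + (PySem.Int.ofStr? (String.ofList digits.reverse)).getD 0])

def p_score_alt (n : Int) : Int := ((pAltTrail 1000 [n]).length : Int)

-- ===== PRECONDITION & SPEC =====
-- helpers for Pre_ only (do not reach the ports)
def pvRev (n : Int) : String := String.ofList (PySem.Int.toStr n).toList.reverse
def pvIsPal (n : Int) : Bool := PySem.Int.toStr n == pvRev n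
def pvStep (n : Int) : Int := n + (PySem.Int.ofStr? (pvRev n)).getD 0
def pvTerm : Nat → Int → Bool
  | 0, _ => false
  | f+1, n => pvIsPal n || pvTerm f (pvStep n)

-- Pre_ excludes negative n (A raises ValueError parsing the reversed string, e.g. int("321-"))
-- and the inputs whose reverse-add iteration reaches no palindrome within Python's default
-- recursion limit (Lychrel candidates such as 196), where A raises RecursionError. A returns on
-- every other input.
def Pre_p_score (n : Int) : Prop := 0 ≤ n ∧ pvTerm 1000 n = true
instance (n : Int) : Decidable (Pre_p_score n) := by unfold Pre_p_score; infer_instance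
def pvWitness_p_score : Int := (12)
def Spec_p_score (n : Int) (out : Int) : Prop := out = p_score_alt n
instance (n : Int) (out : Int) : Decidable (Spec_p_score n out) := by unfold Spec_p_score; infer_instance

-- ===== CLAIM (what is proved, stated in full; the proofs are below) =====
def Claim_equal_p_score : Prop := ∀ (n : Int), Dom_p_score n → Pre_p_score n → Spec_p_score n (p_score n)

-- ===== LEMMAS AND PROOFS =====
-- A's string palindrome test and B's char-list test agree, via toList_toStr
theorem pvOfListToChars (n : Int) : String.ofList (PySem.Int.toChars n) = PySem.Int.toStr n := by
  rw [← PySem.Int.toList_toStr]; exact String.ofList_toList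

theorem pal_iff (n : Int) :
    (PySem.Int.toStr n = String.ofList (PySem.Int.toChars n).reverse) ↔
      (PySem.Int.toChars n = (PySem.Int.toChars n).reverse) := by
  constructor
  · intro h
    have := congrArg String.toList h
    simpa [PySem.Int.toList_toStr, String.toList_ofList] using this
  · intro h
    rw [← pvOfListToChars n]
    exact congrArg String.ofList h

-- invariant: while a palindrome is reached within the fuel, the trajectory built behind a
-- prefix 'pre' has length pre.length + (A's recursion value at the current last element)
theorem pAltTrail_eq (f : Nat) : ∀ (n : Int) (pre : List Int), pvTerm f n = true →
    ((pAltTrail f (pre ++ [n])).length : Int) = pre.length + pScoreAux f n := by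
  induction f with
  | zero => intro n pre h; simp [pvTerm] at h
  | succ f ih =>
    intro n pre h
    simp only [pvTerm, pvIsPal, pvRev, pvStep, Bool.or_eq_true, beq_iff_eq,
      PySem.Int.toList_toStr] at h
    simp only [pAltTrail, pScoreAux, PySem.Str.slice?_none_none_neg_one, Option.getD_some,
      PySem.List.pyGetD_neg_one_append_singleton, PySem.Int.toList_toStr]
    by_cases hp : PySem.Int.toChars n = (PySem.Int.toChars n).reverse
    · rw [if_pos hp, if_pos ((pal_iff n).mpr hp)]
      simp [List.length_append]
    · rw [if_neg hp, if_neg (fun hh => hp ((pal_iff n).mp hh))]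
      have ht : pvTerm f (n + (PySem.Int.ofStr? (String.ofList (PySem.Int.toChars n).reverse)).getD 0) = true := by
        rcases h with h | h
        · exact absurd ((pal_iff n).mp h) hp
        · exact h
      have hrec := ih (n + (PySem.Int.ofStr? (String.ofList (PySem.Int.toChars n).reverse)).getD 0)
        (pre ++ [n]) ht
      rw [hrec]
      simp [List.length_append]
      ring

-- ===== VERDICT (by name: the statement is the Claim_ definition above) =====
theorem p_score_spec : Claim_equal_p_score := by
  intro n _ hpre
  unfold Spec_p_score p_score p_score_alt
  have h := pAltTrail_eq 1000 n [] hpre.2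
  simp only [List.nil_append, List.length_nil, Int.natCast_zero, zero_add] at h
  exact h.symm
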